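-- pv_equiv track=rewrite | github.com/adityasinghiitkgp/DSA_Solutions | Heap/Merge_two_binary_max_heap.py | mergeHeaps
-- ===== SOURCE A (Python) =====
-- def heapify(arr,n,i):
--     large=i
--     l=i*2+1
--     r=i*2+2
--     if l<n and arr[l]>arr[large]:
--         large=l
--     if r<n and arr[r]> arr[large]:
--         large=r
--
--     if large!=i:
--         arr[large],arr[i]=arr[i],arr[large]
--         heapify(arr,n,large)
--
-- def buildheap(arr,n):
--     index=n//2-1
--     for i in range(index,-1,-1):
--         heapify(arr,n,i)
--
-- def mergeHeaps(a, b, n, m):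
--     arr=[0]*(n+m)
--     for i in range(n):
--         arr[i]=a[i]
--     for i in range(m):
--         arr[i+n]=b[i]
--     buildheap(arr,n+m)
--     return arr
-- ===== SOURCE B (Python) =====
-- def mergeHeaps(a, b, n, m):
--     arr = [a[i] for i in range(n)] + [b[i] for i in range(m)]
--     size = len(arr)
--     for i in range(size // 2 - 1, -1, -1):
--         j = i
--         while 2 * j + 1 < size:
--             c = 2 * j + 1
--             if c + 1 < size and arr[c + 1] > arr[c]:
--                 c = c + 1
--             if arr[c] <= arr[j]:
--                 break
--             arr[c], arr[j] = arr[j], arr[c]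
--             j = c
--     return arr
-- ===== Notes on version B (the rewrite author's own statement) =====
-- stated objective: simpler
-- what changed: Builds the merged array with range-comprehensions ([a[i] for i in range(n)] + [b[i] for i in range(m)]) instead of preallocating [0]*(n+m) and copying index by index, and replaces the recursive heapify with an iterative sift-down that first selects the larger child and then does a single parent comparison per level.
-- outside the precondition, e.g. on mergeHeaps([], [5, 6], -1, 2): A returns [6], B returns [6, 5]
import Mathlib
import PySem

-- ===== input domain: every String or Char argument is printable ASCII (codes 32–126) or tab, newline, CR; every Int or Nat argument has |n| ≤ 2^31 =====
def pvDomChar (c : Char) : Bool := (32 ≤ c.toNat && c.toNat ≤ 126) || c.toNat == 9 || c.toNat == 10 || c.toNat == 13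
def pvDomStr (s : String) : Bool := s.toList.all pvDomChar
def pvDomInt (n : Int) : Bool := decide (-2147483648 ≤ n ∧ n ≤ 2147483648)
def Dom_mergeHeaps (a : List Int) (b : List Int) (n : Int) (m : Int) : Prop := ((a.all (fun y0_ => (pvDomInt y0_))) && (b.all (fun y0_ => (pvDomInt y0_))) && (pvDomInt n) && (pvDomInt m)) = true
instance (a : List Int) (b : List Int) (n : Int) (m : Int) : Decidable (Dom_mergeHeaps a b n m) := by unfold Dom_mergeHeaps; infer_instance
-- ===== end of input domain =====

-- B builds the merged array by range-comprehensions instead of writing into a preallocated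
-- buffer, and replaces the recursive heapify by an iterative max-child sift-down
-- (same comparison results, so the output array is identical); objective: simpler.

-- ===== PORT A =====
-- recursive heapify; fuel bounds the recursion depth (depth ≤ n on every admitted input, so
-- fuel n.toNat+1 never runs out inside Pre_); indices reached are nonnegative there, where
-- pyGetD/pySetD are exact Python indexing
def heapifyA : Nat → List Int → Int → Int → List Int
  | 0, arr, _, _ => arr
  | fuel+1, arr, n, i =>
    let l := i*2+1
    let r := i*2+2
    let large1 := if l < n ∧ PySem.List.pyGetD arr l 0 > PySem.List.pyGetD arr i 0 then l else i
    let large := if r < n ∧ PySem.List.pyGetD arr r 0 > PySem.List.pyGetD arr large1 0 then r else large1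
    if large ≠ i then
      heapifyA fuel (PySem.List.pySetD (PySem.List.pySetD arr large (PySem.List.pyGetD arr i 0)) i (PySem.List.pyGetD arr large 0)) n large
    else arr

def buildheapA (arr : List Int) (n : Int) : List Int :=
  let index := PySem.Int.floordiv n 2 - 1
  (PySem.List.pyRange index (-1) (-1)).foldl (fun ar i => heapifyA (n.toNat + 1) ar n i) arr

def mergeHeaps (a : List Int) (b : List Int) (n : Int) (m : Int) : List Int :=
  let arr := List.replicate (n+m).toNat 0
  let arr := (PySem.List.pyRange 0 n 1).foldl (fun ar i => PySem.List.pySetD ar i (PySem.List.pyGetD a i 0)) arr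
  let arr := (PySem.List.pyRange 0 m 1).foldl (fun ar i => PySem.List.pySetD ar (i+n) (PySem.List.pyGetD b i 0)) arr
  buildheapA arr (n+m)

-- ===== PORT B =====
-- iterative sift-down (while loop as fuelled tail recursion; fuel size+1 never runs out)
def siftB : Nat → List Int → Nat → Nat → List Int
  | 0, arr, _, _ => arr
  | fuel+1, arr, size, j =>
    if 2*j+1 < size then
      let c := if 2*j+2 < size ∧ arr.getD (2*j+2) 0 > arr.getD (2*j+1) 0 then 2*j+2 else 2*j+1
      if arr.getD c 0 ≤ arr.getD j 0 then arr
      else siftB fuel ((arr.set c (arr.getD j 0)).set j (arr.getD c 0)) size c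
    else arr

def mergeHeaps_alt (a : List Int) (b : List Int) (n : Int) (m : Int) : List Int :=
  let arr := (PySem.List.pyRange 0 n 1).map (fun i => PySem.List.pyGetD a i 0)
             ++ (PySem.List.pyRange 0 m 1).map (fun i => PySem.List.pyGetD b i 0)
  let size := arr.length
  ((List.range (size / 2)).reverse).foldl (fun ar i => siftB (size + 1) ar size i) arr

-- ===== PRECONDITION & SPEC =====
-- Pre_ excludes counts exceeding the list lengths (A raises IndexError) and mixed-sign
-- counts with one negative (there A raises, or fills an under-sized buffer through
-- accidental negative-index wraparound, a value B need not match).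
def Pre_mergeHeaps (a : List Int) (b : List Int) (n : Int) (m : Int) : Prop :=
  (0 ≤ n ∧ n ≤ (a.length : Int) ∧ 0 ≤ m ∧ m ≤ (b.length : Int)) ∨ (n ≤ 0 ∧ m ≤ 0)
instance (a : List Int) (b : List Int) (n : Int) (m : Int) : Decidable (Pre_mergeHeaps a b n m) := by unfold Pre_mergeHeaps; infer_instance

def pvWitness_mergeHeaps : List Int × List Int × Int × Int := ([10, 5, 6], [12, 7], 3, 2)

def Spec_mergeHeaps (a : List Int) (b : List Int) (n : Int) (m : Int) (out : List Int) : Prop := out = mergeHeaps_alt a b n m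
instance (a : List Int) (b : List Int) (n : Int) (m : Int) (out : List Int) : Decidable (Spec_mergeHeaps a b n m out) := by unfold Spec_mergeHeaps; infer_instance

-- ===== CLAIM (what is proved, stated in full; the proofs are below) =====
def Claim_equal_mergeHeaps : Prop := ∀ (a : List Int) (b : List Int) (n : Int) (m : Int), Dom_mergeHeaps a b n m → Pre_mergeHeaps a b n m → Spec_mergeHeaps a b n m (mergeHeaps a b n m)

-- ===== LEMMAS AND PROOFS =====

theorem heapify_eq_sift (fuel : Nat) (arr : List Int) (size j : Nat) :
    heapifyA fuel arr (size : Int) (j : Int) = siftB fuel arr size j := by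
  induction fuel generalizing arr j with
  | zero => rfl
  | succ fuel IH =>
    have e1 : (j:Int)*2+1 = ((2*j+1 : Nat) : Int) := by push_cast; ring
    have e2 : (j:Int)*2+2 = ((2*j+2 : Nat) : Int) := by push_cast; ring
    simp only [heapifyA, siftB, e1, e2, PySem.List.pyGetD_natCast, PySem.List.pySetD_natCast,
      Nat.cast_lt, ne_eq]
    split_ifs with h1 h2 h3 h4 h5 h6 h7 h8 <;> simp only [PySem.List.pyGetD_natCast, PySem.List.pySetD_natCast, e1, e2] at * <;> first | rfl | exact IH _ _ | omega | exact absurd trivial ‹¬True›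

-- the copy loop (positions i+|pref| := src[i] for i < k) overwrites the tail with src.take k
theorem fold_copy (src : List Int) (k : Nat) (pref tail : List Int)
    (hk : k ≤ src.length) (hk2 : k ≤ tail.length) :
    (List.range k).foldl (fun ar i => ar.set (i + pref.length) (src.getD i 0)) (pref ++ tail)
      = pref ++ (src.take k ++ tail.drop k) := by
  induction k with
  | zero => simp
  | succ k IH =>
    rw [List.range_succ, List.foldl_append, IH (by omega) (by omega)]
    simp only [List.foldl_cons, List.foldl_nil]
    rw [List.set_append_right _ _ (by omega)]
    congr 1
    have h1 : k + pref.length - pref.length = k := by omega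
    have h2 : (src.take k).length = k := by simp; omega
    rw [h1, List.set_append_right _ _ (by omega), h2, Nat.sub_self]
    have h3 : k < tail.length := by omega
    have h4 : k < src.length := by omega
    rw [List.drop_eq_getElem_cons h3, List.set_cons_zero]
    rw [List.getD_eq_getElem _ _ h4, List.take_add_one, List.getElem?_eq_getElem h4]
    simp only [Option.toList_some, List.append_assoc, List.singleton_append]

-- A's two index-copy loops produce exactly a.take n ++ b.take m
theorem init_eq (a b : List Int) (nn mm : Nat) (hna : nn ≤ a.length) (hmb : mm ≤ b.length) :
    (PySem.List.pyRange 0 (mm : Int) 1).foldl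
        (fun ar i => PySem.List.pySetD ar (i + (nn : Int)) (PySem.List.pyGetD b i 0))
        ((PySem.List.pyRange 0 (nn : Int) 1).foldl
          (fun ar i => PySem.List.pySetD ar i (PySem.List.pyGetD a i 0))
          (List.replicate (nn + mm) 0))
      = a.take nn ++ b.take mm := by
  have hfirst := fold_copy a nn [] (List.replicate (nn + mm) 0) hna (by simp)
  have hsecond := fold_copy b mm (a.take nn) (List.replicate mm 0) hmb (by simp)
  have hlen : (a.take nn).length = nn := by simp; omega
  simp only [List.length_nil, Nat.add_zero, List.nil_append, List.drop_replicate,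
    Nat.add_sub_cancel_left] at hfirst
  simp only [hlen, List.drop_replicate, Nat.sub_self, List.replicate_zero,
    List.append_nil] at hsecond
  simp only [PySem.List.pyRange_zero_natCast, List.foldl_map, ← Nat.cast_add,
    PySem.List.pySetD_natCast, PySem.List.pyGetD_natCast]
  rw [hfirst, hsecond]

-- A's bottom-up loop over range(size//2-1,-1,-1) equals B's loop over (range (size/2)).reverse
theorem build_eq (q : Nat) (size : Nat) (arr : List Int) :
    (PySem.List.pyRange ((q : Int) - 1) (-1) (-1)).foldl
        (fun ar i => heapifyA (size + 1) ar (size : Int) i) arr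
      = ((List.range q).reverse).foldl (fun ar j => siftB (size + 1) ar size j) arr := by
  induction q generalizing arr with
  | zero =>
    rw [show ((0 : Nat) : Int) - 1 = -1 by norm_num,
      PySem.List.pyRange_neg_one_eq_nil (by omega)]
    simp
  | succ q IH =>
    rw [show ((q + 1 : Nat) : Int) - 1 = (q : Int) by push_cast; ring,
      PySem.List.pyRange_neg_one_cons (by omega), List.range_succ, List.reverse_append]
    simp only [List.reverse_singleton, List.singleton_append, List.foldl_cons,
      heapify_eq_sift]
    exact IH _

-- the range comprehension [xs[i] for i in range(k)] is xs.take k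
theorem comp_take (xs : List Int) (k : Nat) (hk : k ≤ xs.length) :
    (PySem.List.pyRange 0 (k : Int) 1).map (fun i => PySem.List.pyGetD xs i 0)
      = xs.take k := by
  rw [PySem.List.pyRange_zero_natCast, List.map_map]
  induction k with
  | zero => simp
  | succ k IH =>
    have h4 : k < xs.length := by omega
    rw [List.range_succ, List.map_append, IH (by omega), List.take_add_one,
      List.getElem?_eq_getElem h4]
    simp only [Function.comp, PySem.List.pyGetD_natCast, List.map_cons, List.map_nil,
      Option.toList_some]
    rw [List.getD_eq_getElem _ _ h4]

-- both sides return [] when both counts are ≤ 0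
theorem both_nil (a b : List Int) (n m : Int) (hn : n ≤ 0) (hm : m ≤ 0) :
    mergeHeaps a b n m = mergeHeaps_alt a b n m := by
  have hr : ∀ k : Int, k ≤ 0 → PySem.List.pyRange 0 k 1 = ([] : List Int) := by
    intro k hk
    rw [PySem.List.pyRange_one]
    have h0 : (k - 0).toNat = 0 := by omega
    rw [h0]
    simp
  simp only [mergeHeaps, mergeHeaps_alt, buildheapA, hr n hn, hr m hm,
    List.foldl_nil, List.map_nil, List.append_nil]
  have hnil : (n + m).toNat = 0 := by omega
  rw [hnil]
  have hfd : PySem.Int.floordiv (n + m) 2 - 1 ≤ -1 := by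
    have := PySem.Int.floordiv_eq_ediv_of_pos (a := n + m) (b := 2) (by omega)
    omega
  rw [PySem.List.pyRange_neg_one_eq_nil hfd]
  simp

-- ===== VERDICT (by name: the statement is the Claim_ definition above) =====
theorem mergeHeaps_spec : Claim_equal_mergeHeaps := by
  intro a b n m _ hpre
  show mergeHeaps a b n m = mergeHeaps_alt a b n m
  rcases hpre with ⟨hn, hna, hm, hmb⟩ | ⟨hn, hm⟩
  swap
  · exact both_nil a b n m hn hm
  obtain ⟨nn, rfl⟩ : ∃ nn : Nat, n = (nn : Int) := ⟨n.toNat, (Int.toNat_of_nonneg hn).symm⟩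
  obtain ⟨mm, rfl⟩ : ∃ mm : Nat, m = (mm : Int) := ⟨m.toNat, (Int.toNat_of_nonneg hm).symm⟩
  simp only [mergeHeaps, mergeHeaps_alt, buildheapA]
  have hna' : nn ≤ a.length := by exact_mod_cast hna
  have hmb' : mm ≤ b.length := by exact_mod_cast hmb
  have hcast : ((nn : Int) + (mm : Int)) = ((nn + mm : Nat) : Int) := by push_cast; ring
  rw [hcast, Int.toNat_natCast, init_eq a b nn mm hna' hmb',
    comp_take a nn hna', comp_take b mm hmb']
  have hlen : (a.take nn ++ b.take mm).length = nn + mm := by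
    simp [List.length_take]; omega
  rw [hlen]
  have hfd : PySem.Int.floordiv ((nn + mm : Nat) : Int) 2 - 1 = (((nn + mm) / 2 : Nat) : Int) - 1 := by
    rw [show (2 : Int) = ((2 : Nat) : Int) by norm_num, PySem.Int.floordiv_natCast]
  rw [hfd]
  exact build_eq ((nn + mm) / 2) (nn + mm) _
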